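-- pv_equiv track=rewrite | github.com/RyanLucas3/Python-Command-Line-Interface | UtilityBills.py | mostPopularCompany
-- ===== SOURCE A (Python) =====
-- def mostPopularCompany(bills):
-- #Counts the number of bills attributable to each company.
-- #Then finds the maximum of those.
--     companiesCount = {}
--     newBills = []
--     for i in range(len(bills)):
--         try:
--             if bills[i][0] not in newBills:
--                 dicti = {bills[i][0]: 1}
--                 companiesCount.update(dicti)
--                 newBills.append(bills[i][0])
--             elif bills[i][0] in newBills:
--                 companiesCount[bills[i][0]] += 1
--         except:
--             companiesCount = None
--     return max_of_a_dictionary(companiesCount)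
--
-- def max_of_a_dictionary(companiesCount):
-- #This function checks to see whether there is 1 maximum or 2 maximum values,
-- #given a list of companies
--     maximumValues = 1
--     try:
--         if companiesCount != None:
--             maximum = max(companiesCount, key = companiesCount.get)
--             for s,v in companiesCount.items():
--                 if companiesCount[s] == companiesCount[maximum] and s != maximum:
--                     return('There are two companies that are equally the most popular' + '\n' + 'One of them is ' + max(companiesCount, key = companiesCount.get) + " and the other is " + s + ".")
--                     maximumValues = 2
--             if maximumValues != 2:
--                 return("The company with the most bills on any account is " +  max(companiesCount, key = companiesCount.get).title())
--             else:
--                 return("There are no companies listed")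
--     except:
--         return("There are no companies listed")
-- ===== SOURCE B (Python) =====
-- def mostPopularCompany(bills):
--     counts = {}
--     for bill in bills:
--         company = bill[0]
--         counts[company] = counts.get(company, 0) + 1
--     ranked = sorted(counts.items(), key=lambda kv: -kv[1])
--     if not ranked:
--         return "There are no companies listed"
--     if len(ranked) > 1 and ranked[1][1] == ranked[0][1]:
--         return ('There are two companies that are equally the most popular\n'
--                 'One of them is ' + ranked[0][0] + ' and the other is ' + ranked[1][0] + '.')
--     return 'The company with the most bills on any account is ' + ranked[0][0].title()
-- ===== Notes on version B (the rewrite author's own statement) =====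
-- stated objective: alternative
-- what changed: B merges A's two functions and replaces A's argmax-with-key plus second tie-rescan over the dict by ranking: it sorts the (company,count) pairs once by descending count (stable, so insertion order breaks ties) and reads the answer off the top two entries of the ranking.
-- outside the precondition, e.g. on mostPopularCompany([[]]): A returns None, B raises IndexError
import Mathlib
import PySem

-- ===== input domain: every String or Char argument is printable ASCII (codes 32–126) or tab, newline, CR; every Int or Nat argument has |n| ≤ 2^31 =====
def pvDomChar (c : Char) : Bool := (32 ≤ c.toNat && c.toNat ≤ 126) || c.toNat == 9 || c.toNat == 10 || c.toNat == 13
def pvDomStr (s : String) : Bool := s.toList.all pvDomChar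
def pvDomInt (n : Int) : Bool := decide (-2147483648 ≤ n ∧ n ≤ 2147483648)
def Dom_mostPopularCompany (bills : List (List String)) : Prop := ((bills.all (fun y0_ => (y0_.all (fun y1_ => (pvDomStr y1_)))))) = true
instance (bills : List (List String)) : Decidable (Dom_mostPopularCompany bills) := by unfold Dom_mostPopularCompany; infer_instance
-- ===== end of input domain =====

-- B merges A's two functions and replaces argmax + tie-rescan with one stable sort by
-- descending count, reading the answer off the top two ranked entries (objective: alternative).

-- Python str.title() on the ASCII domain: a letter is uppercased when the previous
-- character is not a letter, lowercased otherwise (shared by both ports; exact on Dom).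
def pyTitleGo : Bool → List Char → List Char
  | _, [] => []
  | prev, c :: cs =>
    (if PySem.Chars.isalpha c then
        (if prev then PySem.Chars.lowerChar c else PySem.Chars.upperChar c)
      else c) :: pyTitleGo (PySem.Chars.isalpha c) cs

def pyTitle (s : String) : String := String.ofList (pyTitleGo false s.toList)

-- ===== PORT A =====
-- one iteration of A's loop body on bills[i] (the whole body is inside try/except;
-- first component none = companiesCount is Python's None)
def pvStepA (st : Option (PySem.Dict String Int) × List String) (row : List String) :
    Option (PySem.Dict String Int) × List String :=
  match row.head? with
  | none => (none, st.2)                -- bills[i][0] raises IndexError; except: companiesCount = None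
  | some c =>
    if st.2.contains c = false then     -- if bills[i][0] not in newBills
      match st.1 with
      | none => (none, st.2)            -- companiesCount.update(...) on None raises; caught
      | some d => (some (d.insert c 1), st.2 ++ [c])
    else                                -- elif bills[i][0] in newBills (always true here)
      match st.1 with
      | none => (none, st.2)            -- companiesCount[...] += 1 on None raises; caught
      | some d =>
        match d.get? c with
        | none => (none, st.2)          -- KeyError; caught
        | some v => (some (d.insert c (v + 1)), st.2)

def maxOfADictionary (companiesCount : Option (PySem.Dict String Int)) : String :=
  match companiesCount with
  | none => ""                          -- Python falls through and returns None (not a string); outside Pre_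
  | some d =>
    match PySem.List.max? d.keys (fun k => d.getD k 0) with     -- max(companiesCount, key=companiesCount.get)
    | none => "There are no companies listed"                   -- max({}) raises ValueError; caught
    | some maximum =>
      match d.items.find? (fun p => (d.getD p.1 0 == d.getD maximum 0) && !(p.1 == maximum)) with
      | some p =>
          "There are two companies that are equally the most popular" ++ "\n" ++
            "One of them is " ++ maximum ++ " and the other is " ++ p.1 ++ "."
      | none =>
          "The company with the most bills on any account is " ++ pyTitle maximum

def mostPopularCompany (bills : List (List String)) : String :=
  -- for i in range(len(bills)): bills[i] is always in range, so pyGetD is exact here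
  maxOfADictionary ((PySem.List.pyRange 0 (PySem.List.len bills)).foldl
      (fun st i => pvStepA st (PySem.List.pyGetD bills i [])) (some PySem.Dict.empty, ([] : List String))).1

-- ===== PORT B =====
def pvCount (counts : PySem.Dict String Int) (bill : List String) : PySem.Dict String Int :=
  match bill.head? with
  | none => counts                      -- bill[0] raises IndexError in Python; outside Pre_
  | some company => counts.insert company (counts.getD company 0 + 1)

def mostPopularCompany_alt (bills : List (List String)) : String :=
  let counts := bills.foldl pvCount PySem.Dict.empty
  let ranked := PySem.List.sorted counts.items (fun kv => -kv.2) false   -- sorted(counts.items(), key=lambda kv: -kv[1])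
  match ranked with
  | [] => "There are no companies listed"                                -- if not ranked
  | top :: rest =>
    match rest with
    | second :: _ =>                    -- len(ranked) > 1
      if second.2 == top.2 then         -- and ranked[1][1] == ranked[0][1]
        "There are two companies that are equally the most popular\nOne of them is " ++
          top.1 ++ " and the other is " ++ second.1 ++ "."
      else "The company with the most bills on any account is " ++ pyTitle top.1
    | [] => "The company with the most bills on any account is " ++ pyTitle top.1

-- ===== PRECONDITION & SPEC =====
-- Pre_ excludes inputs containing an empty inner list: there A's except-clause sets the
-- dict to None and A returns Python's None, which is not a value of the declared string type.
def Pre_mostPopularCompany (bills : List (List String)) : Prop := ∀ row ∈ bills, row ≠ []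
instance (bills : List (List String)) : Decidable (Pre_mostPopularCompany bills) := by
  unfold Pre_mostPopularCompany; infer_instance

def pvWitness_mostPopularCompany : List (List String) := [["acme", "12"], ["zeta"], ["acme"]]

def Spec_mostPopularCompany (bills : List (List String)) (out : String) : Prop :=
  out = mostPopularCompany_alt bills
instance (bills : List (List String)) (out : String) : Decidable (Spec_mostPopularCompany bills out) := by
  unfold Spec_mostPopularCompany; infer_instance

-- ===== CLAIM (what is proved, stated in full; the proofs are below) =====
def Claim_equal_mostPopularCompany : Prop := ∀ (bills : List (List String)),
  Dom_mostPopularCompany bills → Pre_mostPopularCompany bills →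
    Spec_mostPopularCompany bills (mostPopularCompany bills)

-- ===== LEMMAS AND PROOFS =====
theorem pvCount_nodup (bills : List (List String)) (d : PySem.Dict String Int)
    (h : d.keys.Nodup) : (bills.foldl pvCount d).keys.Nodup := by
  induction bills generalizing d with
  | nil => exact h
  | cons row rest ih =>
    refine ih _ ?_
    unfold pvCount
    cases row.head? with
    | none => exact h
    | some c => exact PySem.Dict.nodup_keys_insert _ _ _ h

theorem pvLoop_eq (bills : List (List String)) (d : PySem.Dict String Int)
    (hpre : ∀ row ∈ bills, row ≠ []) :
    bills.foldl pvStepA (some d, d.keys) =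
      (some (bills.foldl pvCount d), (bills.foldl pvCount d).keys) := by
  induction bills generalizing d with
  | nil => rfl
  | cons row rest ih =>
    obtain ⟨c, cs, rfl⟩ : ∃ c cs, row = c :: cs := by
      cases row with
      | nil => exact absurd rfl (hpre _ (by simp))
      | cons c cs => exact ⟨c, cs, rfl⟩
    have hrest : ∀ r ∈ rest, r ≠ [] := fun r hr => hpre r (by simp [hr])
    have hstep : pvStepA (some d, d.keys) (c :: cs) =
        (some (pvCount d (c :: cs)), (pvCount d (c :: cs)).keys) := by
      by_cases hc : c ∈ d.keys
      · have hck : d.keys.contains c = true := by simpa using hc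
        have hdc : d.contains c = true := (PySem.Dict.contains_iff_mem_keys d c).mpr hc
        obtain ⟨v, hv⟩ : ∃ v, d.get? c = some v := by
          have h1 := PySem.Dict.contains_eq_isSome_get? d c
          rw [hdc] at h1
          exact Option.isSome_iff_exists.mp h1.symm
        simp [pvStepA, pvCount, hc, hv, PySem.Dict.getD_of_get?_eq_some _ _ hv,
          PySem.Dict.keys_insert_of_contains d _ hdc]
      · have hck : d.keys.contains c = false := by simpa using hc
        have hdc : d.contains c = false := by
          rw [PySem.Dict.contains_eq_decide_mem_keys]; simpa using hc
        simp [pvStepA, pvCount, hc, PySem.Dict.getD_of_not_contains d _ hdc,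
          PySem.Dict.keys_insert_of_not_contains d _ hdc]
    simp only [List.foldl_cons, hstep]
    exact ih _ hrest

-- the fold step of PySem.List.max? with key f
def pvMaxStep (f : String → Int) (acc : Option String) (x : String) : Option String :=
  match acc with | none => some x | some m => if f m < f x then some x else some m

theorem pvMax?_eq_foldl (K : List String) (f : String → Int) :
    PySem.List.max? K f = K.foldl (pvMaxStep f) none := by
  unfold PySem.List.max?
  congr 1
  funext acc x
  cases acc <;> rfl

theorem pvArgmax_go (f : String → Int) (K : List String) :
    ∀ b m : String, K.foldl (pvMaxStep f) (some b) = some m →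
      (m = b ∧ ∀ k ∈ K, f k ≤ f b) ∨
        (f b < f m ∧ ∃ K1 K2, K = K1 ++ m :: K2 ∧ (∀ k ∈ K1, f k < f m) ∧ (∀ k ∈ K2, f k ≤ f m)) := by
  induction K with
  | nil =>
    intro b m h
    left
    exact ⟨(Option.some_inj.mp h).symm, by simp⟩
  | cons x K ih =>
    intro b m h
    simp only [List.foldl_cons, pvMaxStep] at h
    by_cases hx : f b < f x
    · rw [if_pos hx] at h
      rcases ih x m h with ⟨rfl, hle⟩ | ⟨hlt, K1, K2, rfl, h1, h2⟩
      · right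
        exact ⟨hx, [], K, rfl, by simp, hle⟩
      · right
        refine ⟨lt_trans hx hlt, x :: K1, K2, rfl, ?_, h2⟩
        intro k hk
        rcases List.mem_cons.mp hk with rfl | hk
        · exact hlt
        · exact h1 k hk
    · rw [if_neg hx] at h
      rcases ih b m h with ⟨rfl, hle⟩ | ⟨hlt, K1, K2, rfl, h1, h2⟩
      · left
        refine ⟨rfl, ?_⟩
        intro k hk
        rcases List.mem_cons.mp hk with rfl | hk
        · exact le_of_not_gt hx
        · exact hle k hk
      · right
        refine ⟨hlt, x :: K1, K2, rfl, ?_, h2⟩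
        intro k hk
        rcases List.mem_cons.mp hk with rfl | hk
        · exact lt_of_le_of_lt (le_of_not_gt hx) hlt
        · exact h1 k hk

theorem pvArgmax_split (K : List String) (f : String → Int) (m : String)
    (h : PySem.List.max? K f = some m) :
    ∃ K1 K2, K = K1 ++ m :: K2 ∧ (∀ k ∈ K1, f k < f m) ∧ (∀ k ∈ K2, f k ≤ f m) := by
  rw [pvMax?_eq_foldl] at h
  cases K with
  | nil => simp at h
  | cons k0 K =>
    rw [List.foldl_cons] at h
    have h' : K.foldl (pvMaxStep f) (some k0) = some m := by
      simpa [pvMaxStep] using h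
    rcases pvArgmax_go f K k0 m h' with ⟨rfl, hle⟩ | ⟨hlt, K1, K2, rfl, h1, h2⟩
    · exact ⟨[], K, rfl, by simp, hle⟩
    · refine ⟨k0 :: K1, K2, rfl, ?_, h2⟩
      intro k hk
      rcases List.mem_cons.mp hk with rfl | hk
      · exact hlt
      · exact h1 k hk

-- stable insertion sort: an element not "before" any element of the prefix passes through it
theorem pvInsertBy_append {α : Type} (before : α → α → Bool) (x : α) (A B : List α)
    (h : ∀ a ∈ A, before x a = false) :
    PySem.List.insertBy before x (A ++ B) = A ++ PySem.List.insertBy before x B := by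
  induction A with
  | nil => rfl
  | cons a A ih =>
    have ha : before x a = false := h a (by simp)
    simp only [List.cons_append, PySem.List.insertBy, ha]
    simp only [Bool.false_eq_true, if_false]
    rw [ih (fun a ha' => h a (by simp [ha']))]

-- stable sort by a key bounded below by k0: the minimal-key elements come first, in
-- original order, followed by the sorted remainder
theorem pvSorted_min_prefix {α : Type} (l : List α) (key : α → Int) (k0 : Int)
    (h : ∀ x ∈ l, k0 ≤ key x) :
    PySem.List.sorted l key false =
      l.filter (fun x => key x == k0) ++
        PySem.List.sorted (l.filter (fun x => key x != k0)) key false := by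
  induction l using List.reverseRecOn with
  | nil => rfl
  | append_singleton l x ih =>
    have hl : ∀ y ∈ l, k0 ≤ key y := fun y hy => h y (by simp [hy])
    have hx : k0 ≤ key x := h x (by simp)
    have hstep : ∀ (ys : List α),
        PySem.List.sorted (ys ++ [x]) key false =
          PySem.List.insertBy (fun a b => decide (key a < key b)) x
            (PySem.List.sorted ys key false) := by
      intro ys
      rw [PySem.List.sorted_eq_foldl_insertBy, PySem.List.sorted_eq_foldl_insertBy,
        List.foldl_append]
      rfl
    rw [hstep, ih hl]
    by_cases hk : key x = k0
    · -- x has the minimal key: it slides past the equal-key prefix and lands at the boundary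
      have hA : ∀ a ∈ l.filter (fun y => key y == k0),
          (fun a b => decide (key a < key b)) x a = false := by
        intro a ha
        have := (List.mem_filter.mp ha).2
        simp only [beq_iff_eq] at this
        simp [hk, this]
      rw [pvInsertBy_append _ _ _ _ hA]
      have hfilter1 : (l ++ [x]).filter (fun y => key y == k0)
          = l.filter (fun y => key y == k0) ++ [x] := by
        rw [List.filter_append]; simp [hk]
      have hfilter2 : (l ++ [x]).filter (fun y => key y != k0)
          = l.filter (fun y => key y != k0) := by
        rw [List.filter_append]; simp [hk]
      rw [hfilter1, hfilter2, List.append_assoc]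
      congr 1
      -- insertBy x (sorted rest) = x :: sorted rest since every rest key is > k0 = key x
      cases hrest : PySem.List.sorted (l.filter (fun y => key y != k0)) key false with
      | nil => rfl
      | cons b bs =>
        have hb : b ∈ l.filter (fun y => key y != k0) := by
          rw [← PySem.List.mem_sorted _ key false, hrest]; simp
        have hb2 := List.mem_filter.mp hb
        have hlt : key x < key b := by
          have h1 : k0 ≤ key b := hl b hb2.1
          have h2 : key b ≠ k0 := by simpa using hb2.2
          omega
        simp [PySem.List.insertBy, hlt]
    · -- key x > k0: x passes the whole minimal-key prefix and is inserted in the remainder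
      have hA : ∀ a ∈ l.filter (fun y => key y == k0),
          (fun a b => decide (key a < key b)) x a = false := by
        intro a ha
        have := (List.mem_filter.mp ha).2
        simp only [beq_iff_eq] at this
        have : key a ≤ key x := by omega
        simpa using not_lt.mpr this
      rw [pvInsertBy_append _ _ _ _ hA]
      have hfilter1 : (l ++ [x]).filter (fun y => key y == k0)
          = l.filter (fun y => key y == k0) := by
        rw [List.filter_append]; simp [hk]
      have hfilter2 : (l ++ [x]).filter (fun y => key y != k0)
          = l.filter (fun y => key y != k0) ++ [x] := by
        rw [List.filter_append]; simp [hk]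
      rw [hfilter1, hfilter2, hstep]

theorem pvMain (bills : List (List String))
    (hpre : ∀ row ∈ bills, row ≠ []) :
    mostPopularCompany bills = mostPopularCompany_alt bills := by
  unfold mostPopularCompany mostPopularCompany_alt
  rw [PySem.List.foldl_pyRange_pyGetD bills [] pvStepA _ (by norm_num : (0:Int) ≤ 0)]
  simp only [Int.toNat_zero, List.drop_zero]
  have hloop := pvLoop_eq bills PySem.Dict.empty hpre
  have hek : (PySem.Dict.empty : PySem.Dict String Int).keys = [] := rfl
  rw [hek] at hloop
  rw [hloop]
  set D := bills.foldl pvCount PySem.Dict.empty with hD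
  have hnd : D.keys.Nodup := pvCount_nodup bills _ (by rw [hek]; exact List.nodup_nil)
  have hitems := PySem.Dict.items_eq_map_keys D hnd 0
  simp only [maxOfADictionary]
  cases hmax : PySem.List.max? D.keys (fun k => D.getD k 0) with
  | none =>
    have hK : D.keys = [] := (PySem.List.max?_eq_none_iff _ _).mp hmax
    have : D.items = [] := by rw [hitems, hK]; rfl
    rw [this]
    rfl
  | some m =>
    obtain ⟨K1, K2, hsplit, h1, h2⟩ := pvArgmax_split _ _ _ hmax
    have hmK2 : m ∉ K2 := by
      rw [hsplit] at hnd
      exact (List.nodup_cons.mp hnd.of_append_right).1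
    -- B's ranking: stable sort of items by -count puts the max-count entries first
    have hbound : ∀ p ∈ D.items, -(D.getD m 0) ≤ -p.2 := by
      intro p hp
      rw [hitems] at hp
      obtain ⟨k, hk, rfl⟩ := List.mem_map.mp hp
      rw [hsplit] at hk
      rcases List.mem_append.mp hk with hk | hk
      · have := h1 k hk; simp; omega
      · rcases List.mem_cons.mp hk with rfl | hk
        · simp
        · have := h2 k hk; simp; omega
    have hsorted := pvSorted_min_prefix D.items (fun kv => -kv.2) (-(D.getD m 0)) hbound
    have hfiltmap : ∀ (K : List String),
        (K.map (fun k => (k, D.getD k 0))).filter (fun p => -p.2 == -(D.getD m 0))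
          = (K.filter (fun k => D.getD k 0 == D.getD m 0)).map (fun k => (k, D.getD k 0)) := by
      intro K
      rw [List.filter_map]
      congr 1
      apply List.filter_congr
      intro k _
      by_cases h : D.getD k 0 = D.getD m 0
      · simp [Function.comp, h]
      · simp [Function.comp, h, neg_inj]
    have hfK1 : K1.filter (fun k => D.getD k 0 == D.getD m 0) = [] := by
      rw [List.filter_eq_nil_iff]
      intro k hk
      simp only [beq_iff_eq]
      exact (h1 k hk).ne
    have hfilterEq : D.items.filter (fun p => -p.2 == -(D.getD m 0))
        = (m, D.getD m 0) ::
            (K2.filter (fun k => D.getD k 0 == D.getD m 0)).map (fun k => (k, D.getD k 0)) := by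
      rw [hitems, hsplit, List.map_append, List.map_cons, List.filter_append, hfiltmap, hfK1,
        List.map_nil, List.nil_append, List.filter_cons, hfiltmap]
      simp
    -- A's tie-rescan: the first other key with maximal count, as head of a filter of K2
    have hfind : D.items.find? (fun p => (D.getD p.1 0 == D.getD m 0) && !(p.1 == m))
        = ((K2.filter (fun c => D.getD c 0 == D.getD m 0)).head?).map
            (fun k => (k, D.getD k 0)) := by
      rw [hitems, List.find?_map]
      have hcomp : ((fun p : String × Int => (D.getD p.1 0 == D.getD m 0) && !(p.1 == m)) ∘
          (fun k => (k, D.getD k 0))) = fun k => (D.getD k 0 == D.getD m 0) && !(k == m) := rfl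
      rw [hcomp, hsplit, List.find?_append]
      have hfK1' : K1.find? (fun k => (D.getD k 0 == D.getD m 0) && !(k == m)) = none := by
        rw [List.find?_eq_none]
        intro k hk
        simp only [beq_iff_eq, Bool.and_eq_true, not_and]
        intro hEq
        exact absurd hEq (h1 k hk).ne
      rw [hfK1', List.find?_cons]
      simp only [beq_self_eq_true, Bool.not_true, Bool.and_false]
      rw [List.filter_congr (q := fun k => (D.getD k 0 == D.getD m 0) && !(k == m)) ?_,
        List.head?_filter]
      · rfl
      · intro k hk
        have : (k == m) = false := beq_eq_false_iff_ne.mpr (fun h => hmK2 (h ▸ hk))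
        simp [this]
    simp only [hfind, hsorted, hfilterEq]
    cases hK2f : K2.filter (fun c => D.getD c 0 == D.getD m 0) with
    | cons s rest =>
      -- a tie: both sides name m and s
      have hs : (D.getD s 0 == D.getD m 0) = true := by
        have : s ∈ K2.filter (fun c => D.getD c 0 == D.getD m 0) := by rw [hK2f]; simp
        exact (List.mem_filter.mp this).2
      simp only [List.map_cons, List.head?_cons, Option.map_some, List.cons_append, hs,
        if_true]
      rfl
    | nil =>
      -- no tie: B's second ranked entry (if any) has a strictly smaller count
      simp only [List.map_nil, List.cons_append, List.nil_append, Option.map_none,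
        List.head?_nil]
      cases hrest : PySem.List.sorted (D.items.filter (fun p => -p.2 != -(D.getD m 0)))
          (fun kv => -kv.2) false with
      | nil => rfl
      | cons q qs =>
        have hq : q ∈ D.items.filter (fun p => -p.2 != -(D.getD m 0)) := by
          have hmem : q ∈ PySem.List.sorted (D.items.filter (fun p => -p.2 != -(D.getD m 0)))
              (fun kv => -kv.2) false := by rw [hrest]; simp
          exact (PySem.List.mem_sorted _ _ _ _).mp hmem
        have hq2 : (q.2 == D.getD m 0) = false := by
          have := (List.mem_filter.mp hq).2
          simp only [bne_iff_ne, ne_eq] at this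
          simp only [beq_eq_false_iff_ne, ne_eq]
          omega
        simp only [hq2]
        rfl

theorem mostPopularCompany_spec : Claim_equal_mostPopularCompany := by
  intro bills _ hpre
  show mostPopularCompany bills = mostPopularCompany_alt bills
  exact pvMain bills hpre
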